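-- pv_equiv track=rewrite | github.com/peli-rufus/IconCacheReader | IconCacheReader.py | _clean_extension
-- ===== SOURCE A (Python) =====
-- def _clean_extension(ext: str) -> str:
--     """
--     Normalise a file extension: keep the leading dot plus ASCII alnum/underscore
--     characters only, stopping at the first non-ASCII character.
--
--     This strips garbage bytes that the fallback scanner appends when it reads
--     past the null terminator into adjacent binary metadata, e.g.:
--         '.exe\\u1234garbage'  ->  '.exe'
--         '.lnk\\u9a4b\\u0c6a'  ->  '.lnk'
--     """
--     if not ext:
--         return ""
--     if not ext.startswith("."):
--         ext = "." + ext
--     clean = "."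
--     for ch in ext[1:]:
--         if ch.isascii() and (ch.isalnum() or ch == "_"):
--             clean += ch
--         else:
--             break
--     return clean if len(clean) > 1 else ""
-- ===== SOURCE B (Python) =====
-- def _clean_extension(ext: str) -> str:
--     """Normalise a file extension: leading dot + ASCII [A-Za-z0-9_] prefix."""
--     if not ext:
--         return ""
--     body = ext[1:] if ext.startswith(".") else ext
--     bad = next(
--         (i for i, ch in enumerate(body)
--          if not ("a" <= ch <= "z" or "A" <= ch <= "Z" or "0" <= ch <= "9" or ch == "_")),
--         len(body),
--     )
--     return "." + body[:bad] if bad else ""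
-- ===== Notes on version B (the rewrite author's own statement) =====
-- stated objective: alternative
-- what changed: B replaces A's accumulate-and-break loop (string concatenation plus dot-prepend normalisation) with a scan that finds the index of the first invalid character and returns a single slice.
import Mathlib
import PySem

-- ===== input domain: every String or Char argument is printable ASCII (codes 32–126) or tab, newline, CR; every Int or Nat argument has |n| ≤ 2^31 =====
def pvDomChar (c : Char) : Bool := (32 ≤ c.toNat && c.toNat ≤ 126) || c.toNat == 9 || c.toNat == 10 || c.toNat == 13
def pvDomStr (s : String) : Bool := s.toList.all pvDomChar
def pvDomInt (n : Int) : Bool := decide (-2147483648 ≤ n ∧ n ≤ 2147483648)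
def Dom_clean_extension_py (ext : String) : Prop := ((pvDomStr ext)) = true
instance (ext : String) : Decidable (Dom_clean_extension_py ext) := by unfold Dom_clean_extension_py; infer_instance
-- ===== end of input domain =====

-- B replaces A's accumulate-and-break loop with a find-first-invalid-index scan plus one slice (alternative decomposition, same cost).


-- ===== PORT A =====
-- A's character test: ch.isascii() and (ch.isalnum() or ch == "_")
-- (ch.isascii() ported as c.toNat ≤ 127, exact; isalnum via PySem, exact on ASCII)
def pvCondA (c : Char) : Bool :=
  decide (c.toNat ≤ 127) && (PySem.Chars.isalnum c || c == '_')

-- the `for ch in ext[1:]` loop with its `break`, accumulating `clean`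
def pvLoopA : List Char → List Char → List Char
  | [], clean => clean
  | c :: rest, clean => if pvCondA c then pvLoopA rest (clean ++ [c]) else clean

def clean_extension_py (ext : String) : String :=
  if ext.toList = [] then ""
  else
    let l := if PySem.Chars.startswith ext.toList ['.'] then ext.toList else '.' :: ext.toList
    let clean := pvLoopA (l.drop 1) ['.']
    if clean.length > 1 then String.mk clean else ""

-- ===== PORT B =====
-- B's character class: "a" <= ch <= "z" or "A" <= ch <= "Z" or "0" <= ch <= "9" or ch == "_"
def pvWordB (c : Char) : Bool :=
  (decide ('a' ≤ c) && decide (c ≤ 'z')) || (decide ('A' ≤ c) && decide (c ≤ 'Z')) ||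
  (decide ('0' ≤ c) && decide (c ≤ '9')) || c == '_'

def clean_extension_py_alt (ext : String) : String :=
  if ext.toList = [] then ""
  else
    let body := if PySem.Chars.startswith ext.toList ['.'] then ext.toList.drop 1 else ext.toList
    -- next((i for i, ch in enumerate(body) if not <word>), len(body))
    let bad := (body.findIdx? fun c => !pvWordB c).getD body.length
    if bad = 0 then "" else String.mk ('.' :: body.take bad)

-- ===== PRECONDITION & SPEC =====
def Spec_clean_extension_py (ext : String) (out : String) : Prop := out = clean_extension_py_alt ext
instance (ext : String) (out : String) : Decidable (Spec_clean_extension_py ext out) := by unfold Spec_clean_extension_py; infer_instance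

-- ===== CLAIM (what is proved, stated in full; the proofs are below) =====
def Claim_equal_clean_extension_py : Prop := ∀ (ext : String), Dom_clean_extension_py ext → Spec_clean_extension_py ext (clean_extension_py ext)

-- ===== LEMMAS AND PROOFS =====

-- A's test and B's class coincide (PySem's isalnum is the ASCII alnum ranges).
theorem pvCond_eq (c : Char) : pvCondA c = pvWordB c := by
  unfold pvCondA pvWordB PySem.Chars.isalnum PySem.Chars.isalpha PySem.Chars.isdigit
    PySem.Chars.isupper PySem.Chars.islower
  have hn : ∀ d : Char, c ≤ d ↔ c.val.toNat ≤ d.val.toNat := fun d => by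
    rw [Char.le_def, UInt32.le_iff_toNat_le]
  have hn' : ∀ d : Char, d ≤ c ↔ d.val.toNat ≤ c.val.toNat := fun d => by
    rw [Char.le_def, UInt32.le_iff_toNat_le]
  have he : (c = '_') ↔ c.val.toNat = 95 := by
    rw [Char.ext_iff, ← UInt32.toNat_inj]; rfl
  rw [Bool.eq_iff_iff]
  simp only [Bool.and_eq_true, Bool.or_eq_true, decide_eq_true_eq, beq_iff_eq, hn, hn', he,
    show c.toNat = c.val.toNat from rfl,
    show ('A'.val.toNat = 65) from rfl, show ('Z'.val.toNat = 90) from rfl,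
    show ('a'.val.toNat = 97) from rfl, show ('z'.val.toNat = 122) from rfl,
    show ('0'.val.toNat = 48) from rfl, show ('9'.val.toNat = 57) from rfl]
  omega

-- A's break-loop is takeWhile appended to the accumulator.
theorem pvLoopA_eq (l acc : List Char) : pvLoopA l acc = acc ++ l.takeWhile pvCondA := by
  induction l generalizing acc with
  | nil => simp [pvLoopA]
  | cons c rest ih =>
    by_cases h : pvCondA c = true
    · simp [pvLoopA, h, ih]
    · simp [pvLoopA, h, Bool.eq_false_iff.mpr h, List.takeWhile_cons]

-- B's first-bad-index slice is takeWhile.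
theorem take_findIdx_eq (p : Char → Bool) (l : List Char) :
    l.take ((l.findIdx? fun c => !p c).getD l.length) = l.takeWhile p := by
  induction l with
  | nil => simp
  | cons c rest ih =>
    by_cases h : p c = true
    · have hshift : (((rest.findIdx? fun c => !p c).map (· + 1)).getD (rest.length + 1))
          = ((rest.findIdx? fun c => !p c).getD rest.length) + 1 := by
        cases rest.findIdx? fun c => !p c <;> simp
      simp [List.findIdx?_cons, h, List.takeWhile_cons, hshift, ih]
    · simp [List.findIdx?_cons, h, Bool.eq_false_iff.mpr h, List.takeWhile_cons]

theorem bad_le (p : Char → Bool) (l : List Char) :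
    ((l.findIdx? fun c => !p c).getD l.length) ≤ l.length := by
  cases hf : l.findIdx? fun c => !p c with
  | none => simp
  | some i =>
    simpa using le_of_lt (List.findIdx?_eq_some_iff_findIdx_eq.mp hf).1

-- ===== VERDICT (by name: the statement is the Claim_ definition above) =====
theorem clean_extension_py_spec : Claim_equal_clean_extension_py := by
  intro ext _
  unfold Spec_clean_extension_py clean_extension_py clean_extension_py_alt
  by_cases he : ext.toList = []
  · simp [he]
  · simp only [he, if_false]
    set body := (if PySem.Chars.startswith ext.toList ['.'] then ext.toList.drop 1
                 else ext.toList) with hbody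
    have hl : (if PySem.Chars.startswith ext.toList ['.'] then ext.toList
               else '.' :: ext.toList).drop 1 = body := by
      by_cases hs : PySem.Chars.startswith ext.toList ['.'] <;> simp [hbody, hs]
    rw [hl, pvLoopA_eq]
    set bad := (body.findIdx? fun c => !pvWordB c).getD body.length with hbad
    have htw : body.takeWhile pvCondA = body.take bad := by
      rw [show pvCondA = pvWordB from funext pvCond_eq, hbad, take_findIdx_eq]
    have hlen : (body.take bad).length = bad :=
      List.length_take_of_le (by rw [hbad]; exact bad_le _ _)
    rw [htw]
    by_cases hz : bad = 0
    · simp [hz]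
    · have hgt : (['.'] ++ body.take bad).length > 1 := by simp [hlen]; omega
      rw [if_pos hgt, if_neg hz]; simp
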